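-- pv_equiv track=rewrite | github.com/2visionspzoo/pdf-to-xml-app | app/parsers/universal_parser_v4.py | _extract_seller_section
-- ===== SOURCE A (Python) =====
-- def _extract_seller_section(text: str, start_pos: int) -> str:
--     """Wyciąga sekcję sprzedawcy"""
--     end_keywords = ['Lp', 'L.p.', 'Pozycje', 'Santander', 'Razem', 'PKO', 'Items']
--     end_pos = len(text)
--
--     for kw in end_keywords:
--         pos = text.find(kw, start_pos)
--         if pos != -1:
--             end_pos = min(end_pos, pos)
--
--     return text[start_pos:end_pos]
-- ===== SOURCE B (Python) =====
-- def _extract_seller_section(text: str, start_pos: int) -> str: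
--     """Wyciaga sekcje sprzedawcy: scan forward to the first end-keyword."""
--     keywords = ('Lp', 'L.p.', 'Pozycje', 'Santander', 'Razem', 'PKO', 'Items')
--     for i in range(start_pos, len(text)):
--         if text.startswith(keywords, i):
--             return text[start_pos:i]
--     return text[start_pos:]
-- ===== Notes on version B (the rewrite author's own statement) =====
-- stated objective: alternative
-- what changed: Instead of seven separate text.find scans combined with min, B makes a single left-to-right scan from start_pos and stops at the first position where any end-keyword starts; Pre_ excludes negative start_pos, outside the function's natural domain, where A's value comes from Python's negative-index wraparound in find and slicing.
-- outside the precondition, e.g. on _extract_seller_section('Lpx', -2): A returns 'px', B returns ''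
import Mathlib
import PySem

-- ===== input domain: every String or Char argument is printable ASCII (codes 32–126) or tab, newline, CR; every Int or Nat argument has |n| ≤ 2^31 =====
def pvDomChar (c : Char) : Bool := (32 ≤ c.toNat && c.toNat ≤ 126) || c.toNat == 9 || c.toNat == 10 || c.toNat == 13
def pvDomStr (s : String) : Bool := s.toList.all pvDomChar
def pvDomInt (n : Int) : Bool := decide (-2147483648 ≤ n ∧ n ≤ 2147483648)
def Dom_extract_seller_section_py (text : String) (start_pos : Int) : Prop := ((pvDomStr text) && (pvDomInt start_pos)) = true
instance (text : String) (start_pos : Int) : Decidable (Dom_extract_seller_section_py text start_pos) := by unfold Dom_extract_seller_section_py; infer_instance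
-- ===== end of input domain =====

-- B replaces A's seven find-then-min keyword scans by one left-to-right scan from start_pos
-- that stops at the first position where any end-keyword starts (alternative algorithm).

-- ===== PORT A =====
def aKeywords : List String := ["Lp", "L.p.", "Pozycje", "Santander", "Razem", "PKO", "Items"]

def extract_seller_section_py (text : String) (start_pos : Int) : String :=
  let end_pos : Int := aKeywords.foldl
    (fun ep kw =>
      let pos := PySem.Str.findFrom text kw start_pos
      if pos ≠ -1 then min ep pos else ep)
    (PySem.Str.len text)
  PySem.Str.slice text (some start_pos) (some end_pos)

-- ===== PORT B =====
def bKeywords : List String := ["Lp", "L.p.", "Pozycje", "Santander", "Razem", "PKO", "Items"]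

-- Source B's for-loop over range(start_pos, len(text)), fuel = n - i; Python's
-- text.startswith(keywords, i) with 0 ≤ i is exact as "some keyword is a prefix of s.drop i";
-- 'some i' is the early return at position i, 'none' the fall-through after the loop
def pvScan (s : List Char) : Nat → Nat → Option Nat
  | _, 0 => none
  | i, fuel+1 =>
    if bKeywords.any (fun kw => PySem.Chars.startswith (List.drop i s) kw.toList) then some i
    else pvScan s (i+1) fuel

def extract_seller_section_py_alt (text : String) (start_pos : Int) : String :=
  let s := text.toList
  match pvScan s start_pos.toNat (s.length - start_pos.toNat) with
  | some i => PySem.Str.slice text (some start_pos) (some (i : Int))  -- return text[start_pos:i]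
  | none => PySem.Str.slice text (some start_pos) none                -- return text[start_pos:]

-- ===== PRECONDITION & SPEC =====
-- Pre_ excludes negative start_pos: outside the function's natural domain (a position in text),
-- where A's value is an artefact of Python's negative-index wraparound in find and slicing.
def Pre_extract_seller_section_py (text : String) (start_pos : Int) : Prop := 0 ≤ start_pos
instance (text : String) (start_pos : Int) : Decidable (Pre_extract_seller_section_py text start_pos) := by unfold Pre_extract_seller_section_py; infer_instance
def pvWitness_extract_seller_section_py : String × Int := ("Faktura ABC Lp 1", 8)

def Spec_extract_seller_section_py (text : String) (start_pos : Int) (out : String) : Prop := out = extract_seller_section_py_alt text start_pos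
instance (text : String) (start_pos : Int) (out : String) : Decidable (Spec_extract_seller_section_py text start_pos out) := by unfold Spec_extract_seller_section_py; infer_instance

-- ===== CLAIM (what is proved, stated in full; the proofs are below) =====
def Claim_equal_extract_seller_section_py : Prop := ∀ (text : String) (start_pos : Int), Dom_extract_seller_section_py text start_pos → Pre_extract_seller_section_py text start_pos → Spec_extract_seller_section_py text start_pos (extract_seller_section_py text start_pos)

-- ===== LEMMAS AND PROOFS =====

-- "some end-keyword starts at position j of s"
def Hit (s : List Char) (j : Nat) : Prop := ∃ kw ∈ aKeywords, kw.toList <+: List.drop j s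

lemma aKeywords_ne_nil : ∀ kw ∈ aKeywords, kw.toList ≠ [] := by decide

lemma bAny_iff (s : List Char) (i : Nat) :
    (bKeywords.any (fun kw => PySem.Chars.startswith (List.drop i s) kw.toList) = true) ↔ Hit s i := by
  simp [PySem.Chars.startswith_iff, Hit, bKeywords, aKeywords]

-- a prefix at a later position is an infix of the earlier suffix
lemma prefix_drop_infix (s kw : List Char) {k j : Nat} (hkj : k ≤ j)
    (h : kw <+: List.drop j s) : kw <:+: List.drop k s := by
  have hd : List.drop j s = List.drop (j - k) (List.drop k s) := by
    rw [List.drop_drop]; congr 1; omega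
  rw [hd] at h
  exact h.isInfix.trans (List.drop_suffix _ _).isInfix

-- findFrom only depends on the clamped start position
lemma ff_congr (s sub : List Char) (a b : Int)
  (h : (if a < 0 then (if a + (s.length:Int) < 0 then 0 else a + (s.length:Int)) else a)
     = (if b < 0 then (if b + (s.length:Int) < 0 then 0 else b + (s.length:Int)) else b)) :
  PySem.Chars.findFrom s sub a none = PySem.Chars.findFrom s sub b none := by
  unfold PySem.Chars.findFrom
  simp only []
  rw [h]

-- Chars.findFrom from an arbitrary Int start equals findFrom from the clamped slice-start (nonempty needle)
lemma findFrom_clamp (s sub : List Char) (hsub : sub ≠ []) (a : Int) :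
    PySem.Chars.findFrom s sub a none
      = PySem.Chars.findFrom s sub ((PySem.List.clampIdx s.length a : Nat) : Int) none := by
  by_cases hgt : (s.length : Int) < a
  · have hcl : PySem.List.clampIdx s.length a = s.length := by
      unfold PySem.List.clampIdx; split_ifs <;> omega
    rw [hcl]
    unfold PySem.Chars.findFrom
    simp only []
    rw [if_pos (by split_ifs <;> omega)]
    have hst : (if ((s.length:Nat):Int) < 0 then
        (if ((s.length:Nat):Int) + ((s.length:Nat):Int) < 0 then 0 else ((s.length:Nat):Int) + ((s.length:Nat):Int))
        else ((s.length:Nat):Int)) = ((s.length:Nat):Int) := by split_ifs <;> omega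
    rw [hst]
    have hdrop : List.drop (((s.length:Nat) : Int)).toNat (List.take (((s.length:Nat) : Int)).toNat s) = [] := by simp
    rw [if_neg (by omega), hdrop]
    rw [if_pos]
    rw [PySem.Chars.find_eq_neg_one_iff]
    intro hin
    exact hsub (List.eq_nil_of_infix_nil hin)
  · apply ff_congr
    unfold PySem.List.clampIdx
    split_ifs <;> omega

-- the scan returns the least hit in [i, i+fuel), or none if there is no hit there
lemma pvScan_spec (s : List Char) : ∀ (fuel i : Nat),
    (∀ r, pvScan s i fuel = some r →
        i ≤ r ∧ r < i + fuel ∧ Hit s r ∧ (∀ j, i ≤ j → j < r → ¬ Hit s j)) ∧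
    (pvScan s i fuel = none → ∀ j, i ≤ j → j < i + fuel → ¬ Hit s j) := by
  intro fuel
  induction fuel with
  | zero =>
    intro i
    constructor
    · intro r hr
      exact absurd hr (by simp [pvScan])
    · intro _ j h1 h2
      omega
  | succ m ih =>
    intro i
    by_cases h : (bKeywords.any (fun kw => PySem.Chars.startswith (List.drop i s) kw.toList) = true)
    · have hr : pvScan s i (m+1) = some i := by simp [pvScan, h]
      refine ⟨fun r hrr => ?_, fun hrr => by rw [hr] at hrr; cases hrr⟩
      rw [hr] at hrr; cases hrr
      exact ⟨le_refl _, by omega, (bAny_iff s i).mp h, fun j h1 h2 => by omega⟩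
    · have hr : pvScan s i (m+1) = pvScan s (i+1) m := by simp [pvScan, h]
      obtain ⟨ihs, ihn⟩ := ih (i+1)
      rw [hr]
      constructor
      · intro r hrr
        obtain ⟨h1, h2, h3, h4⟩ := ihs r hrr
        refine ⟨by omega, by omega, h3, ?_⟩
        intro j hj1 hj2
        rcases Nat.eq_or_lt_of_le hj1 with heq | hlt
        · subst heq; exact fun hh => h ((bAny_iff s i).mpr hh)
        · exact h4 j hlt hj2
      · intro hrr j hj1 hj2
        rcases Nat.eq_or_lt_of_le hj1 with heq | hlt
        · subst heq; exact fun hh => h ((bAny_iff s i).mpr hh)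
        · exact ihn hrr j hlt (by omega)

-- invariant of A's foldl over the keyword list
lemma fold_inv (s : List Char) (a : Int) (K : List String) (hK : ∀ kw ∈ K, kw ∈ aKeywords) :
    ∀ ep : Int,
      ((PySem.List.clampIdx s.length a : Nat) : Int) ≤ ep → ep ≤ (s.length : Int) →
      (ep < (s.length : Int) → Hit s ep.toNat) →
      (((PySem.List.clampIdx s.length a : Nat) : Int) ≤ (K.foldl (fun ep kw =>
            let pos := PySem.Chars.findFrom s kw.toList a none
            if pos ≠ -1 then min ep pos else ep) ep) ∧
       (K.foldl (fun ep kw =>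
            let pos := PySem.Chars.findFrom s kw.toList a none
            if pos ≠ -1 then min ep pos else ep) ep) ≤ (s.length : Int) ∧
       ((K.foldl (fun ep kw =>
            let pos := PySem.Chars.findFrom s kw.toList a none
            if pos ≠ -1 then min ep pos else ep) ep) < (s.length : Int) →
          Hit s ((K.foldl (fun ep kw =>
            let pos := PySem.Chars.findFrom s kw.toList a none
            if pos ≠ -1 then min ep pos else ep) ep)).toNat) ∧
       (K.foldl (fun ep kw =>
            let pos := PySem.Chars.findFrom s kw.toList a none
            if pos ≠ -1 then min ep pos else ep) ep) ≤ ep ∧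
       (∀ j : Nat, PySem.List.clampIdx s.length a ≤ j →
          (j : Int) < (K.foldl (fun ep kw =>
            let pos := PySem.Chars.findFrom s kw.toList a none
            if pos ≠ -1 then min ep pos else ep) ep) →
          ∀ kw ∈ K, ¬ kw.toList <+: List.drop j s)) := by
  induction K with
  | nil =>
    intro ep h1 h2 h3
    simp only [List.foldl_nil]
    exact ⟨h1, h2, h3, le_refl _, by intro j _ _ kw hkw; cases hkw⟩
  | cons kw K' ih =>
    intro ep h1 h2 h3
    have hkwA : kw ∈ aKeywords := hK kw (by simp)
    have hne : kw.toList ≠ [] := aKeywords_ne_nil kw hkwA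
    have hK' : ∀ k ∈ K', k ∈ aKeywords := fun k hk => hK k (by simp [hk])
    have hk_le : PySem.List.clampIdx s.length a ≤ s.length := PySem.List.clampIdx_le _ _
    simp only [List.foldl_cons]
    rw [findFrom_clamp s kw.toList hne a]
    set k : Nat := PySem.List.clampIdx s.length a with hkdef
    set pos : Int := PySem.Chars.findFrom s kw.toList ((k : Nat) : Int) none with hpos
    by_cases hneg : pos = -1
    · have habs : ¬ kw.toList <:+: List.drop k s :=
        (PySem.Chars.findFrom_natCast_eq_neg_one_iff s kw.toList k hk_le).mp hneg
      rw [if_neg (by simp [hneg])]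
      obtain ⟨g1, g2, g3, g4, g5⟩ := ih hK' ep h1 h2 h3
      refine ⟨g1, g2, g3, g4, ?_⟩
      intro j hj1 hj2 kw' hkw'
      rcases List.mem_cons.mp hkw' with rfl | hmem
      · exact fun hp => habs (prefix_drop_infix s kw'.toList hj1 hp)
      · exact g5 j hj1 hj2 kw' hmem
    · obtain ⟨p1, p2, p3⟩ := PySem.Chars.findFrom_natCast_spec s kw.toList k hk_le hneg
      have hposn : pos < (s.length : Int) := by
        have hlen := p2.length_le
        rw [List.length_drop] at hlen
        have : 1 ≤ kw.toList.length := List.length_pos_iff.mpr hne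
        omega
      rw [if_pos (by simp [hneg])]
      have h1' : ((k : Nat) : Int) ≤ min ep pos := le_min h1 p1
      have h2' : min ep pos ≤ (s.length : Int) := le_trans (min_le_right _ _) (le_of_lt hposn)
      have h3' : min ep pos < (s.length : Int) → Hit s (min ep pos).toNat := by
        intro _
        rcases min_cases ep pos with ⟨hm, hle⟩ | ⟨hm, hle⟩
        · rw [hm]; exact h3 (by omega)
        · rw [hm]; exact ⟨kw, hkwA, p2⟩
      obtain ⟨g1, g2, g3, g4, g5⟩ := ih hK' (min ep pos) h1' h2' h3'
      refine ⟨g1, g2, g3, le_trans g4 (min_le_left _ _), ?_⟩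
      intro j hj1 hj2 kw' hkw'
      rcases List.mem_cons.mp hkw' with rfl | hmem
      · have hjp : (j : Int) < pos := lt_of_lt_of_le hj2 (le_trans g4 (min_le_right _ _))
        exact p3 j hj1 (by omega)
      · exact g5 j hj1 hj2 kw' hmem

-- text[a:len(text)] = text[a:] for 0 ≤ a
lemma slice_to_len (xs : List Char) (a : Int) (ha : 0 ≤ a) :
    PySem.List.slice xs (some a) (some ((xs.length : Nat) : Int))
      = PySem.List.slice xs (some a) none := by
  rw [PySem.List.slice_toNat xs ha (by positivity), PySem.List.slice_some_none]
  have hcl : PySem.List.clampIdx xs.length a = min a.toNat xs.length := by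
    unfold PySem.List.clampIdx; split_ifs <;> omega
  rw [hcl]
  by_cases h : a.toNat ≤ xs.length
  · rw [min_eq_left h]
    apply List.take_of_length_le
    simp
  · rw [min_eq_right (by omega)]
    rw [List.drop_eq_nil_of_le (by omega), List.drop_eq_nil_of_le (le_refl _)]
    rw [List.take_nil]

-- ===== VERDICT (by name: the statement is the Claim_ definition above) =====
theorem extract_seller_section_py_spec : Claim_equal_extract_seller_section_py := by
  intro text start_pos _ hpre
  unfold Pre_extract_seller_section_py at hpre
  unfold Spec_extract_seller_section_py
  unfold extract_seller_section_py extract_seller_section_py_alt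
  simp only [PySem.Str.findFrom, PySem.Str.len]
  set s : List Char := text.toList with hs
  set i0 : Nat := start_pos.toNat with hi0
  have hsp : start_pos = ((i0 : Nat) : Int) := by omega
  have hk : PySem.List.clampIdx s.length start_pos = min i0 s.length := by
    unfold PySem.List.clampIdx; split_ifs <;> omega
  obtain ⟨g1, g2, g3, _, g5⟩ := fold_inv s start_pos aKeywords (fun _ h => h)
      ((s.length : Nat) : Int) (by rw [hk]; exact_mod_cast min_le_right _ _) (le_refl _) (by omega)
  set F : Int := aKeywords.foldl (fun ep kw =>
      let pos := PySem.Chars.findFrom s kw.toList start_pos none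
      if pos ≠ -1 then min ep pos else ep) ((s.length : Nat) : Int) with hF
  rw [hk] at g1 g5
  obtain ⟨hsome, hnone⟩ := pvScan_spec s (s.length - i0) i0
  cases hres : pvScan s i0 (s.length - i0) with
  | some r =>
    obtain ⟨q1, q2, q3, q4⟩ := hsome r hres
    -- r exists ⇒ i0 < s.length ⇒ the clamp is i0
    have hlt : i0 < s.length := by omega
    have hmin : min i0 s.length = i0 := min_eq_left (le_of_lt hlt)
    rw [hmin] at g1 g5
    have hFr : F = ((r : Nat) : Int) := by
      rcases lt_trichotomy F ((r : Nat) : Int) with hl | he | hg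
      · exfalso
        have hFn : F < (s.length : Int) := by omega
        exact q4 F.toNat (by omega) (by omega) (g3 hFn)
      · exact he
      · exfalso
        obtain ⟨kw, hmem, hpre'⟩ := q3
        exact g5 r q1 hg kw hmem hpre'
    rw [hFr]
  | none =>
    have hnohit : ∀ j, min i0 s.length ≤ j → j < s.length → ¬ Hit s j := by
      intro j hj1 hj2
      by_cases hc : i0 ≤ s.length
      · rw [min_eq_left hc] at hj1
        exact hnone hres j hj1 (by omega)
      · omega
    have hFn : F = ((s.length : Nat) : Int) := by
      rcases lt_or_eq_of_le g2 with hl | he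
      · exfalso
        exact hnohit F.toNat (by omega) (by omega) (g3 hl)
      · exact he
    rw [hFn]
    -- text[start_pos:len] = text[start_pos:]
    show PySem.Str.slice text (some start_pos) (some ((s.length : Nat) : Int))
        = PySem.Str.slice text (some start_pos) none
    unfold PySem.Str.slice
    congr 1
    simp only [PySem.Chars.slice_eq_listSlice]
    exact slice_to_len s start_pos hpre
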